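-- pv_equiv track=rewrite | github.com/damp11113/damp11113-library | src/damp11113/utils.py | addStringEveryN
-- ===== SOURCE A (Python) =====
-- def addStringEveryN(original_string, add_string, n):
--     # Input validation
--     if not isinstance(original_string, str) or not isinstance(add_string, str):
--         raise TypeError("Both original_string and add_string must be strings.")
--     if not isinstance(n, int) or n <= 0:
--         raise ValueError("n must be a positive integer.")
--
--     chunks = [original_string[i:i+n] for i in range(0, len(original_string), n)]
--     result = add_string.join(chunks)
--     return result
-- ===== SOURCE B (Python) =====
-- def addStringEveryN(original_string, add_string, n):
--     # Input validation
--     if not isinstance(original_string, str) or not isinstance(add_string, str):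
--         raise TypeError("Both original_string and add_string must be strings.")
--     if not isinstance(n, int) or n <= 0:
--         raise ValueError("n must be a positive integer.")
--
--     # Single character-by-character pass: emit the separator at every index
--     # that is a positive multiple of n, then the character; no chunk list.
--     parts = []
--     for i, ch in enumerate(original_string):
--         if i > 0 and i % n == 0:
--             parts.append(add_string)
--         parts.append(ch)
--     return ''.join(parts)
-- ===== Notes on version B (the rewrite author's own statement) =====
-- stated objective: alternative
-- what changed: Replaced the build-chunk-list-then-join strategy (slice into n-sized chunks, add_string.join) with a single character-by-character pass that decides per index, via i % n == 0, whether to emit the separator before the character.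
import Mathlib
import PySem

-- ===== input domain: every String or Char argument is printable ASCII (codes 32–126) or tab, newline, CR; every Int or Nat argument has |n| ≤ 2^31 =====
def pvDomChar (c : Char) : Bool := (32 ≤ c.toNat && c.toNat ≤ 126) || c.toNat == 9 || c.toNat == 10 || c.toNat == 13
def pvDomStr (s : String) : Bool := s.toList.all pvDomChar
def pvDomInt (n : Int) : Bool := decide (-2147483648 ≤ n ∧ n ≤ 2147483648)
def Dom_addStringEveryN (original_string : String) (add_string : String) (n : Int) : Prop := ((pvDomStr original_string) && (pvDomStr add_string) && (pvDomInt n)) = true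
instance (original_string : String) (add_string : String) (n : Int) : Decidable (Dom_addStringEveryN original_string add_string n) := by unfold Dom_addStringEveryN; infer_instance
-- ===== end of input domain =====

-- B replaces A's slice-into-chunks-then-join with a single per-character pass that emits the
-- separator whenever the index is a positive multiple of n (objective: alternative decomposition).


-- ===== PORT A =====
-- chunks = [original_string[i:i+n] for i in range(0, len(original_string), n)]; add_string.join(chunks)
def addStringEveryN (original_string : String) (add_string : String) (n : Int) : String :=
  let cs := original_string.toList
  let chunks := (PySem.List.pyRange 0 (cs.length : Int) n).map
      (fun i => PySem.List.slice cs (some i) (some (i + n)))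
  String.mk (PySem.Chars.join add_string.toList chunks)

-- ===== PORT B =====
-- for i, ch in enumerate(s): if i > 0 and i % n == 0: parts.append(add_string); parts.append(ch)
def addStringEveryN_alt (original_string : String) (add_string : String) (n : Int) : String :=
  let sep := add_string.toList
  let parts := (PySem.List.enumerate original_string.toList).foldl
      (fun acc p => if 0 < p.1 ∧ PySem.Int.mod p.1 n = 0 then acc ++ sep ++ [p.2] else acc ++ [p.2]) []
  String.mk parts

-- ===== PRECONDITION & SPEC =====
-- Pre_ excludes exactly n ≤ 0, where the Python A raises ValueError (B raises identically).
def Pre_addStringEveryN (original_string : String) (add_string : String) (n : Int) : Prop := 0 < n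
instance (original_string : String) (add_string : String) (n : Int) : Decidable (Pre_addStringEveryN original_string add_string n) := by unfold Pre_addStringEveryN; infer_instance
def pvWitness_addStringEveryN : String × String × Int := ("abcdef", "-", 2)

def Spec_addStringEveryN (original_string : String) (add_string : String) (n : Int) (out : String) : Prop := out = addStringEveryN_alt original_string add_string n
instance (original_string : String) (add_string : String) (n : Int) (out : String) : Decidable (Spec_addStringEveryN original_string add_string n out) := by unfold Spec_addStringEveryN; infer_instance

-- ===== CLAIM (what is proved, stated in full; the proofs are below) =====
def Claim_equal_addStringEveryN : Prop := ∀ (original_string : String) (add_string : String) (n : Int), Dom_addStringEveryN original_string add_string n → Pre_addStringEveryN original_string add_string n → Spec_addStringEveryN original_string add_string n (addStringEveryN original_string add_string n)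

-- ===== LEMMAS AND PROOFS =====

-- The common recursive description both ports are reduced to: n'-char chunks separated by sep.
def chunkRec (sep : List Char) (n' : Nat) (cs : List Char) : List Char :=
  if n' = 0 ∨ cs.length ≤ n' then cs
  else cs.take n' ++ sep ++ chunkRec sep n' (cs.drop n')
termination_by cs.length
decreasing_by
  simp only [List.length_drop]
  omega

theorem chunkRec_of_le (sep : List Char) (n' : Nat) (cs : List Char) (h : cs.length ≤ n') :
    chunkRec sep n' cs = cs := by
  rw [chunkRec]; simp [h]

theorem chunkRec_of_gt (sep : List Char) (n' : Nat) (cs : List Char) (h0 : 0 < n')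
    (h : n' < cs.length) :
    chunkRec sep n' cs = cs.take n' ++ sep ++ chunkRec sep n' (cs.drop n') := by
  rw [chunkRec]
  have hx : ¬ (n' = 0 ∨ cs.length ≤ n') := by omega
  simp [hx]

-- ---- A side: the chunk list is chunkRec's chunk structure ----

def chunksA (n : Int) (cs : List Char) : List (List Char) :=
  (PySem.List.pyRange 0 (cs.length : Int) n).map
    (fun i => PySem.List.slice cs (some i) (some (i + n)))

theorem addStringEveryN_eq (original_string add_string : String) (n : Int) :
    addStringEveryN original_string add_string n =
      String.mk (PySem.Chars.join add_string.toList (chunksA n original_string.toList)) := rfl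

-- range(0, b, n) starts with 0 and continues as range(n, b, n), for 0 < n, 0 < b
theorem pyRange_pos_cons (b n : Int) (hn : 0 < n) (hb : 0 < b) :
    PySem.List.pyRange 0 b n = 0 :: PySem.List.pyRange n b n := by
  rw [PySem.List.pyRange_of_pos 0 b hn, PySem.List.pyRange_of_pos n b hn]
  by_cases h : n < b
  · have h1 : ((b - 0 + n - 1) / n).toNat = ((b - n + n - 1) / n).toNat + 1 := by
      have e1 : b - 0 + n - 1 = (b - n + n - 1) + 1 * n := by ring
      rw [e1, Int.add_mul_ediv_right _ _ (by omega : n ≠ 0)]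
      have : 0 ≤ (b - n + n - 1) / n := Int.ediv_nonneg (by omega) (by omega)
      omega
    simp only [hb, h, if_true, h1, List.range_succ_eq_map, List.map_cons, List.map_map]
    congr 1
    · simp
    · apply List.map_congr_left; intro k _
      simp only [Function.comp]
      push_cast
      ring
  · have hv : ((b + n - 1) / n).toNat = 1 := by
      have e1 : b + n - 1 = (b - 1) + 1 * n := by ring
      rw [e1, Int.add_mul_ediv_right _ _ (by omega : n ≠ 0),
        Int.ediv_eq_zero_of_lt (by omega) (by omega)]
      rfl
    simp [hb, h, hv]

-- range(n, b, n) is range(0, b - n, n) shifted by n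
theorem pyRange_pos_shift (b n : Int) (hn : 0 < n) :
    PySem.List.pyRange n b n = (PySem.List.pyRange 0 (b - n) n).map (fun i => n + i) := by
  rw [PySem.List.pyRange_of_pos n b hn, PySem.List.pyRange_of_pos 0 (b - n) hn]
  have e : (b - n + n - 1) = (b - n - 0 + n - 1) := by ring
  have hiff : n < b ↔ (0:Int) < b - n := by omega
  rw [List.map_map]
  by_cases h : n < b
  · simp only [h, if_true, hiff.mp h, if_true, e]
    apply List.map_congr_left; intro k _
    simp [Function.comp]
  · simp [h, hiff.not.mp h]

theorem chunksA_nil (n : Int) (hn : 0 < n) : chunksA n [] = [] := by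
  unfold chunksA
  have h0 : ((([] : List Char).length : Int)) = 0 := rfl
  rw [h0, PySem.List.pyRange_of_pos 0 0 hn]
  simp

theorem slice_head (n : Int) (cs : List Char) (hn : 0 < n) :
    PySem.List.slice cs (some 0) (some (0 + n)) = cs.take n.toNat := by
  rw [PySem.List.slice_toNat cs (by omega) (by omega)]
  simp

theorem chunksA_singleton (n : Int) (cs : List Char) (hn : 0 < n) (hcs : cs ≠ [])
    (hle : cs.length ≤ n.toNat) : chunksA n cs = [cs] := by
  unfold chunksA
  have hb : 0 < (cs.length : Int) := by simp [List.length_pos_iff, hcs]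
  rw [pyRange_pos_cons _ _ hn hb, PySem.List.pyRange_of_pos _ _ hn]
  have hnb : ¬ n < (cs.length : Int) := by omega
  simp only [hnb, if_false, List.range_zero, List.map_nil, List.map_cons]
  rw [slice_head _ _ hn]
  simp [List.take_of_length_le hle]

theorem chunksA_cons (n : Int) (cs : List Char) (hn : 0 < n) (hgt : n.toNat < cs.length) :
    chunksA n cs = cs.take n.toNat :: chunksA n (cs.drop n.toNat) := by
  unfold chunksA
  have hb : 0 < (cs.length : Int) := by omega
  rw [pyRange_pos_cons _ _ hn hb, List.map_cons, pyRange_pos_shift _ _ hn, List.map_map,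
    slice_head _ _ hn]
  have hlen : ((cs.drop n.toNat).length : Int) = (cs.length : Int) - n := by
    rw [List.length_drop]
    omega
  rw [hlen]
  congr 1
  apply List.map_congr_left; intro i hi
  have hi0 : 0 ≤ i := by
    rcases (PySem.List.mem_pyRange_iff_of_pos hn i).mp hi with ⟨h1, _, _⟩
    omega
  simp only [Function.comp]
  rw [PySem.List.slice_toNat _ (by omega) (by omega),
      PySem.List.slice_toNat _ (by omega) (by omega), List.drop_drop]
  congr 1
  · omega
  · congr 1
    omega

theorem joinA_eq_chunkRec (sep : List Char) (n : Int) (cs : List Char) (hn : 0 < n) :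
    PySem.Chars.join sep (chunksA n cs) = chunkRec sep n.toNat cs := by
  by_cases h0 : cs = []
  · subst h0
    rw [chunksA_nil n hn, PySem.Chars.join_nil, chunkRec_of_le]
    simp
  by_cases hle : cs.length ≤ n.toNat
  · rw [chunksA_singleton n cs hn h0 hle, PySem.Chars.join_singleton, chunkRec_of_le _ _ _ hle]
  · have hgt : n.toNat < cs.length := by omega
    rw [chunksA_cons n cs hn hgt]
    have hd : cs.drop n.toNat ≠ [] := by
      simp only [ne_eq, List.drop_eq_nil_iff]
      omega
    have ih := joinA_eq_chunkRec sep n (cs.drop n.toNat) hn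
    by_cases hle2 : (cs.drop n.toNat).length ≤ n.toNat
    · rw [chunksA_singleton n _ hn hd hle2] at ih ⊢
      rw [PySem.Chars.join_cons_cons, PySem.Chars.join_singleton,
        chunkRec_of_gt _ _ _ (by omega) hgt, chunkRec_of_le _ _ _ hle2]
    · rw [chunksA_cons n _ hn (by omega)] at ih ⊢
      rw [PySem.Chars.join_cons_cons, ih, chunkRec_of_gt _ _ _ (by omega) hgt]
termination_by cs.length
decreasing_by
  simp only [List.length_drop]
  omega

-- ---- B side: the enumerate-fold computes chunkRec ----

def bstep (sep : List Char) (n : Int) : List Char → Int × Char → List Char :=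
  fun acc p => if 0 < p.1 ∧ PySem.Int.mod p.1 n = 0 then acc ++ sep ++ [p.2] else acc ++ [p.2]

def Bfold (sep : List Char) (n : Int) (cs : List Char) (s : Int) (acc : List Char) : List Char :=
  (PySem.List.enumerate cs s).foldl (bstep sep n) acc

theorem addStringEveryN_alt_eq (original_string add_string : String) (n : Int) :
    addStringEveryN_alt original_string add_string n =
      String.mk (Bfold add_string.toList n original_string.toList 0 []) := rfl

theorem Bfold_nil (sep : List Char) (n : Int) (s : Int) (acc : List Char) :
    Bfold sep n [] s acc = acc := rfl

theorem Bfold_cons (sep : List Char) (n : Int) (c : Char) (cs : List Char) (s : Int)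
    (acc : List Char) :
    Bfold sep n (c :: cs) s acc = Bfold sep n cs (s + 1) (bstep sep n acc (s, c)) := by
  unfold Bfold
  rw [PySem.List.enumerate_cons, List.foldl_cons]

theorem Bfold_append (sep : List Char) (n : Int) (a b : List Char) (s : Int) (acc : List Char) :
    Bfold sep n (a ++ b) s acc = Bfold sep n b (s + a.length) (Bfold sep n a s acc) := by
  induction a generalizing s acc with
  | nil => simp [Bfold_nil]
  | cons c tl ih =>
    rw [List.cons_append, Bfold_cons, Bfold_cons, ih]
    congr 1
    simp only [List.length_cons]
    push_cast
    omega

-- if no index in [s, s + len) is a positive multiple of n, the fold just copies the characters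
theorem Bfold_nofire (sep : List Char) (n : Int) (cs : List Char) (s : Int) (acc : List Char)
    (h : ∀ i : Int, s ≤ i → i < s + cs.length → ¬ (0 < i ∧ n ∣ i)) :
    Bfold sep n cs s acc = acc ++ cs := by
  induction cs generalizing s acc with
  | nil => simp [Bfold_nil]
  | cons c tl ih =>
    rw [Bfold_cons]
    have hc : ¬ (0 < s ∧ n ∣ s) := h s (le_refl s) (by simp)
    have hstep : bstep sep n acc (s, c) = acc ++ [c] := by
      unfold bstep
      have hx : ¬ (0 < s ∧ PySem.Int.mod s n = 0) := by
        rw [PySem.Int.mod_eq_zero_iff_dvd]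
        exact hc
      simp [hx]
    rw [hstep, ih]
    · simp
    · intro i h1 h2
      apply h i (by omega)
      simp only [List.length_cons]
      push_cast
      push_cast at h2
      omega

-- one whole chunk starting at a positive multiple of n: separator once, then the characters
theorem Bfold_chunk (sep : List Char) (n : Int) (cs : List Char) (s : Int) (acc : List Char)
    (hn : 0 < n) (hs : 0 < s) (hd : n ∣ s) (hne : cs ≠ []) (hle : cs.length ≤ n.toNat) :
    Bfold sep n cs s acc = acc ++ sep ++ cs := by
  obtain ⟨c, tl, rfl⟩ := List.exists_cons_of_ne_nil hne
  rw [Bfold_cons]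
  have hstep : bstep sep n acc (s, c) = acc ++ sep ++ [c] := by
    unfold bstep
    have hx : (0 < s ∧ PySem.Int.mod s n = 0) := ⟨hs, (PySem.Int.mod_eq_zero_iff_dvd s n).mpr hd⟩
    simp [hx]
  rw [hstep, Bfold_nofire]
  · simp
  · intro i h1 h2 hcontra
    obtain ⟨_, hdvd⟩ := hcontra
    have h3 : i < s + n := by
      simp only [List.length_cons] at hle
      push_cast at h2 ⊢
      omega
    have h4 : n ∣ (i - s) := dvd_sub hdvd hd
    have h5 : 0 < i - s := by omega
    have h6 : n ≤ i - s := Int.le_of_dvd h5 h4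
    omega

theorem Bfold_pos (sep : List Char) (n : Int) (cs : List Char) (s : Int) (acc : List Char)
    (hn : 0 < n) (hs : 0 < s) (hd : n ∣ s) (hne : cs ≠ []) :
    Bfold sep n cs s acc = acc ++ sep ++ chunkRec sep n.toNat cs := by
  by_cases hle : cs.length ≤ n.toNat
  · rw [Bfold_chunk sep n cs s acc hn hs hd hne hle, chunkRec_of_le _ _ _ hle]
  · have hgt : n.toNat < cs.length := by omega
    have hsplit : cs = cs.take n.toNat ++ cs.drop n.toNat := (List.take_append_drop _ _).symm
    rw [hsplit, Bfold_append]
    have htne : cs.take n.toNat ≠ [] := by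
      simp only [ne_eq, List.take_eq_nil_iff, not_or]
      exact ⟨by omega, hne⟩
    have htlen : (cs.take n.toNat).length = n.toNat := by
      simp [List.length_take]; omega
    rw [Bfold_chunk sep n _ s acc hn hs hd htne (by simp [List.length_take])]
    have hdne : cs.drop n.toNat ≠ [] := by
      simp only [ne_eq, List.drop_eq_nil_iff]; omega
    rw [htlen, Bfold_pos sep n (cs.drop n.toNat) (s + n.toNat) _ hn (by omega)
      (by exact dvd_add hd (by simp [Int.toNat_of_nonneg hn.le])) hdne]
    rw [← hsplit, chunkRec_of_gt _ _ _ (by omega) hgt]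
    simp
termination_by cs.length
decreasing_by
  simp only [List.length_drop]
  omega

theorem Bfold_zero (sep : List Char) (n : Int) (cs : List Char) (acc : List Char) (hn : 0 < n) :
    Bfold sep n cs 0 acc = acc ++ chunkRec sep n.toNat cs := by
  by_cases hle : cs.length ≤ n.toNat
  · rw [chunkRec_of_le _ _ _ hle, Bfold_nofire]
    intro i h1 h2 hcontra
    obtain ⟨hpos, hdvd⟩ := hcontra
    have h6 : n ≤ i := Int.le_of_dvd hpos hdvd
    push_cast at h2
    omega
  · have hgt : n.toNat < cs.length := by omega
    have hsplit : cs = cs.take n.toNat ++ cs.drop n.toNat := (List.take_append_drop _ _).symm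
    rw [hsplit, Bfold_append]
    have hfire : Bfold sep n (cs.take n.toNat) 0 acc = acc ++ cs.take n.toNat := by
      apply Bfold_nofire
      intro i h1 h2 hcontra
      obtain ⟨hpos, hdvd⟩ := hcontra
      have h6 : n ≤ i := Int.le_of_dvd hpos hdvd
      have hlt : (cs.take n.toNat).length ≤ n.toNat := by simp [List.length_take]
      push_cast at h2
      omega
    rw [hfire]
    have htlen : (cs.take n.toNat).length = n.toNat := by
      simp [List.length_take]; omega
    have hdne : cs.drop n.toNat ≠ [] := by
      simp only [ne_eq, List.drop_eq_nil_iff]; omega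
    rw [htlen, Bfold_pos sep n _ (0 + n.toNat) _ hn (by omega)
      (by simp [Int.toNat_of_nonneg hn.le]) hdne]
    rw [← hsplit, chunkRec_of_gt _ _ _ (by omega) hgt]
    simp

-- ===== VERDICT (by name: the statement is the Claim_ definition above) =====
theorem addStringEveryN_spec : Claim_equal_addStringEveryN := by
  intro s a n _ hn
  unfold Spec_addStringEveryN
  rw [addStringEveryN_eq, addStringEveryN_alt_eq, joinA_eq_chunkRec _ _ _ hn,
    Bfold_zero _ _ _ _ hn, List.nil_append]
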